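-- pv_equiv track=rewrite | github.com/Richter3766/baekjoon-algorithm | implementation/2573.py | calculateMelting
-- ===== SOURCE A (Python) =====
-- def calculateMelting(row, col, icebergs):
--     meltedList = []
--     for r in range(row):
--         for c in range(col):
--             if icebergs[r][c] > 0:
--                 meltNum = 0
--                 for dr, dc in directions:
--                     nr, nc = r + dr, c + dc
--                     if 0 <= nr < row and 0 <= nc < col and icebergs[nr][nc] == 0:
--                         meltNum += 1
--                 meltedList.append((r, c, meltNum))
--
--     return meltedList
--
-- directions = [(1, 0), (-1, 0), (0, 1), (0, -1)]
-- ===== SOURCE B (Python) =====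
-- def calculateMelting(row, col, icebergs):
--     # scatter pass: every zero cell contributes +1 to each positive orthogonal neighbor
--     melt = [[0] * col for _ in range(row)]
--     for r in range(row):
--         for c in range(col):
--             if icebergs[r][c] == 0:
--                 for dr, dc in ((1, 0), (-1, 0), (0, 1), (0, -1)):
--                     nr, nc = r + dr, c + dc
--                     if 0 <= nr < row and 0 <= nc < col and icebergs[nr][nc] > 0:
--                         melt[nr][nc] += 1
--     return [(r, c, melt[r][c])
--             for r in range(row) for c in range(col)
--             if icebergs[r][c] > 0]
-- ===== Notes on version B (the rewrite author's own statement) =====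
-- stated objective: alternative
-- what changed: A gathers: for each positive cell it scans its 4 neighbors counting zeros; B scatters: it pre-seeds a row*col count grid with zeros, has every zero cell increment the count of each positive orthogonal neighbor, then emits positive cells with their accumulated counts in row-major order.
import Mathlib
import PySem

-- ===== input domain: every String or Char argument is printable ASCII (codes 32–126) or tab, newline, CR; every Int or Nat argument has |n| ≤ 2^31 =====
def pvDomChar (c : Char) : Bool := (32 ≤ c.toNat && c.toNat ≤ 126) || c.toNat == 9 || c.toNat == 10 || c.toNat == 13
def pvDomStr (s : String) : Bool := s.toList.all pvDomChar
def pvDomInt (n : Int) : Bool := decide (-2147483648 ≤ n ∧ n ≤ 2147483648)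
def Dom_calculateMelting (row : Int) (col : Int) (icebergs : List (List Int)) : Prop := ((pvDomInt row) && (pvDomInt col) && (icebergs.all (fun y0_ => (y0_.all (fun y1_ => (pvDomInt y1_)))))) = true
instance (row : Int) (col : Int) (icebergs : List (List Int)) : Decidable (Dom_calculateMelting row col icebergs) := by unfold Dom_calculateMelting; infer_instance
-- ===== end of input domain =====

-- B replaces A's per-cell gather of zero neighbors by a scatter pass over zero cells
-- into a pre-seeded melt-count grid (objective: alternative decomposition, same cost).
-- `icebergs[r][c]` for indices that are in range under Pre_ (both programs only read
-- in-range cells there); out of range it defaults to 0, a case Pre_ excludes.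
def pvGrid (g : List (List Int)) (r c : Int) : Int :=
  ((PySem.List.pyGet? g r).bind (fun l => PySem.List.pyGet? l c)).getD 0

-- ===== PORT A =====
def pvDirections : List (Int × Int) := [(1, 0), (-1, 0), (0, 1), (0, -1)]

def calculateMelting (row : Int) (col : Int) (icebergs : List (List Int)) : List (Int × Int × Int) :=
  (PySem.List.pyRange 0 row 1).foldl (fun meltedList r =>
    (PySem.List.pyRange 0 col 1).foldl (fun meltedList c =>
      if pvGrid icebergs r c > 0 then
        meltedList ++ [(r, c,
          pvDirections.foldl (fun meltNum d =>
            if 0 ≤ r + d.1 ∧ r + d.1 < row ∧ 0 ≤ c + d.2 ∧ c + d.2 < col ∧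
                pvGrid icebergs (r + d.1) (c + d.2) = 0
            then meltNum + 1 else meltNum) 0)]
      else meltedList) meltedList) []

-- ===== PORT B =====
-- `melt[nr][nc] += 1`; both indices are nonnegative at every call site, so `.toNat` is exact.
def pvInc (m : List (List Int)) (a b : Int) : List (List Int) :=
  m.modify a.toNat (fun l => l.modify b.toNat (fun x => x + 1))

def pvScatterStep (row col : Int) (g : List (List Int)) (m : List (List Int)) (r c : Int) :
    List (List Int) :=
  if pvGrid g r c = 0 then
    ([(1, 0), (-1, 0), (0, 1), (0, -1)] : List (Int × Int)).foldl (fun m d =>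
      if 0 ≤ r + d.1 ∧ r + d.1 < row ∧ 0 ≤ c + d.2 ∧ c + d.2 < col ∧
          pvGrid g (r + d.1) (c + d.2) > 0
      then pvInc m (r + d.1) (c + d.2) else m) m
  else m

def calculateMelting_alt (row : Int) (col : Int) (icebergs : List (List Int)) : List (Int × Int × Int) :=
  let melt := (PySem.List.pyRange 0 row 1).foldl (fun melt r =>
      (PySem.List.pyRange 0 col 1).foldl (fun melt c =>
        pvScatterStep row col icebergs melt r c) melt)
    ((PySem.List.pyRange 0 row 1).map (fun _ => List.replicate col.toNat (0 : Int)))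
  (PySem.List.pyRange 0 row 1).foldl (fun out r =>
    (PySem.List.pyRange 0 col 1).foldl (fun out c =>
      if pvGrid icebergs r c > 0 then out ++ [(r, c, pvGrid melt r c)] else out) out) []

-- ===== PRECONDITION & SPEC =====
-- Pre_ excludes exactly the inputs on which Python A raises IndexError:
-- positive loop bounds that exceed the actual grid dimensions.
def Pre_calculateMelting (row : Int) (col : Int) (icebergs : List (List Int)) : Prop :=
  0 < row → 0 < col →
    (row ≤ (icebergs.length : Int) ∧ ∀ l ∈ icebergs.take row.toNat, col ≤ (l.length : Int))

instance (row : Int) (col : Int) (icebergs : List (List Int)) :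
    Decidable (Pre_calculateMelting row col icebergs) := by
  unfold Pre_calculateMelting; infer_instance

def pvWitness_calculateMelting : Int × Int × List (List Int) := (2, 2, [[1, 0], [0, 2]])

def Spec_calculateMelting (row : Int) (col : Int) (icebergs : List (List Int)) (out : List (Int × Int × Int)) : Prop := out = calculateMelting_alt row col icebergs
instance (row : Int) (col : Int) (icebergs : List (List Int)) (out : List (Int × Int × Int)) : Decidable (Spec_calculateMelting row col icebergs out) := by unfold Spec_calculateMelting; infer_instance

-- ===== CLAIM (what is proved, stated in full; the proofs are below) =====
def Claim_equal_calculateMelting : Prop := ∀ (row : Int) (col : Int) (icebergs : List (List Int)), Dom_calculateMelting row col icebergs → Pre_calculateMelting row col icebergs → Spec_calculateMelting row col icebergs (calculateMelting row col icebergs)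

-- ===== LEMMAS AND PROOFS =====

def ShapeM (row col : Int) (m : List (List Int)) : Prop :=
  m.length = row.toNat ∧ ∀ l ∈ m, l.length = col.toNat

theorem pvGrid_nonneg (m : List (List Int)) (i j : Int) (hi : 0 ≤ i) (hj : 0 ≤ j) :
    pvGrid m i j = ((m[i.toNat]?.bind (fun l => l[j.toNat]?)).getD 0) := by
  have h1 : i = ((i.toNat : Nat) : Int) := (Int.toNat_of_nonneg hi).symm
  have h2 : j = ((j.toNat : Nat) : Int) := (Int.toNat_of_nonneg hj).symm
  simp only [pvGrid]
  rw [h1, h2]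
  simp only [Int.toNat_natCast, PySem.List.pyGet?_natCast]

theorem mem_modify {α : Type} (f : α → α) (l : List α) :
    ∀ (k : Nat), ∀ x ∈ l.modify k f, x ∈ l ∨ ∃ y ∈ l, x = f y := by
  induction l with
  | nil => intro k x hx; simp [List.modify_nil] at hx
  | cons a l ih =>
    intro k x hx
    cases k with
    | zero =>
      simp [List.modify] at hx
      rcases hx with h | h
      · exact Or.inr ⟨a, by simp, h⟩
      · exact Or.inl (by simp [h])
    | succ k =>
      simp [List.modify] at hx
      rcases hx with h | h
      · exact Or.inl (by simp [h])
      · rcases ih k x h with h' | ⟨y, hy, hxy⟩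
        · exact Or.inl (by simp [h'])
        · exact Or.inr ⟨y, by simp [hy], hxy⟩

theorem shape_pvInc (row col : Int) (m : List (List Int)) (a b : Int)
    (h : ShapeM row col m) : ShapeM row col (pvInc m a b) := by
  obtain ⟨h1, h2⟩ := h
  refine ⟨by simpa [pvInc, List.length_modify] using h1, ?_⟩
  intro l hl
  rcases mem_modify _ m a.toNat l hl with h' | ⟨y, hy, hly⟩
  · exact h2 l h'
  · rw [hly]; simpa [List.length_modify] using h2 y hy

theorem read_pvInc (row col : Int) (m : List (List Int)) (h : ShapeM row col m)
    (a b i j : Int) (ha : 0 ≤ a) (hb : 0 ≤ b)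
    (hi : 0 ≤ i) (hi2 : i < row) (hj : 0 ≤ j) (hj2 : j < col) :
    pvGrid (pvInc m a b) i j = pvGrid m i j + (if a = i ∧ b = j then 1 else 0) := by
  obtain ⟨hlen, hrow⟩ := h
  rw [pvGrid_nonneg _ _ _ hi hj, pvGrid_nonneg _ _ _ hi hj]
  have hilen : i.toNat < m.length := by rw [hlen]; omega
  by_cases hai : a = i
  · subst hai
    have hsome : m[a.toNat]? = some m[a.toNat] := List.getElem?_eq_getElem hilen
    by_cases hbj : b = j
    · subst hbj
      have hjlen : b.toNat < (m[a.toNat]).length := by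
        rw [hrow _ (List.getElem_mem hilen)]; omega
      simp [pvInc, hsome, List.getElem?_eq_getElem hjlen]
    · have hbj' : b.toNat ≠ j.toNat := by omega
      simp [pvInc, hsome, hbj', hbj]
  · have hai' : a.toNat ≠ i.toNat := by omega
    simp [pvInc, hai', hai]

theorem foldl_read {α : Type} (row col : Int) (F : List (List Int) → α → List (List Int))
    (φ : α → Int) (i j : Int)
    (hF : ∀ m a, ShapeM row col m →
      ShapeM row col (F m a) ∧ pvGrid (F m a) i j = pvGrid m i j + φ a) :
    ∀ (L : List α) (m : List (List Int)), ShapeM row col m →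
      ShapeM row col (L.foldl F m) ∧
      pvGrid (L.foldl F m) i j = pvGrid m i j + (L.map φ).sum := by
  intro L
  induction L with
  | nil => intro m hm; simpa using hm
  | cons a L ih =>
    intro m hm
    obtain ⟨hs, hr⟩ := hF m a hm
    obtain ⟨hs', hr'⟩ := ih (F m a) hs
    refine ⟨hs', ?_⟩
    simp only [List.foldl_cons, List.map_cons, List.sum_cons] at *
    omega

theorem sum_map_ite_eq {α : Type} [DecidableEq α] (L : List α) (hL : L.Nodup) (v : α)
    (Q : α → Prop) [DecidablePred Q] (k : Int) :
    (L.map (fun x => if x = v ∧ Q x then k else 0)).sum = if v ∈ L ∧ Q v then k else 0 := by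
  induction L with
  | nil => simp
  | cons a L ih =>
    have hnd := (List.nodup_cons.mp hL)
    simp only [List.map_cons, List.sum_cons, ih hnd.2]
    by_cases hav : a = v
    · subst hav
      have : (if a ∈ L ∧ Q a then k else 0) = 0 := by simp [hnd.1]
      rw [this]
      by_cases hq : Q a <;> simp [hq]
    · have : ¬(a = v ∧ Q a) := fun hc => hav hc.1
      rw [if_neg this]
      simp only [List.mem_cons]
      by_cases hv : v ∈ L ∧ Q v
      · rw [if_pos hv, if_pos ⟨Or.inr hv.1, hv.2⟩]; omega
      · rw [if_neg hv]
        have hno : ¬((v = a ∨ v ∈ L) ∧ Q v) := by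
          rintro ⟨h1 | h1, h2⟩
          · exact hav h1.symm
          · exact hv ⟨h1, h2⟩
        rw [if_neg hno]
        omega

theorem foldl_congr' {α σ : Type} (L : List α) (F F' : σ → α → σ)
    (h : ∀ s a, a ∈ L → F s a = F' s a) : ∀ s, L.foldl F s = L.foldl F' s := by
  induction L with
  | nil => intro s; rfl
  | cons a L ih =>
    intro s
    simp only [List.foldl_cons]
    rw [h s a (by simp)]
    exact ih (fun s a ha => h s a (by simp [ha])) _

def pvCondInc (row col : Int) (g m : List (List Int)) (r c dr dc : Int) : List (List Int) :=
  if 0 ≤ r + dr ∧ r + dr < row ∧ 0 ≤ c + dc ∧ c + dc < col ∧ pvGrid g (r + dr) (c + dc) > 0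
  then pvInc m (r + dr) (c + dc) else m

theorem read_pvCondInc (row col : Int) (g m : List (List Int)) (h : ShapeM row col m)
    (r c dr dc i j : Int) (hi : 0 ≤ i) (hi2 : i < row) (hj : 0 ≤ j) (hj2 : j < col) :
    ShapeM row col (pvCondInc row col g m r c dr dc) ∧
    pvGrid (pvCondInc row col g m r c dr dc) i j = pvGrid m i j +
      (if (0 ≤ r + dr ∧ r + dr < row ∧ 0 ≤ c + dc ∧ c + dc < col ∧
            pvGrid g (r + dr) (c + dc) > 0) ∧ (r + dr = i ∧ c + dc = j) then 1 else 0) := by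
  by_cases hg : 0 ≤ r + dr ∧ r + dr < row ∧ 0 ≤ c + dc ∧ c + dc < col ∧
      pvGrid g (r + dr) (c + dc) > 0
  · refine ⟨by simp only [pvCondInc, if_pos hg]; exact shape_pvInc _ _ _ _ _ h, ?_⟩
    rw [pvCondInc, if_pos hg, read_pvInc row col m h _ _ i j hg.1 hg.2.2.1 hi hi2 hj hj2]
    simp [hg]
  · refine ⟨by simp [pvCondInc, hg, h], ?_⟩
    simp [pvCondInc, hg]

theorem scatter_eq (row col : Int) (g m : List (List Int)) (r c : Int) :
    pvScatterStep row col g m r c =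
      if pvGrid g r c = 0 then
        pvCondInc row col g
          (pvCondInc row col g
            (pvCondInc row col g
              (pvCondInc row col g m r c 1 0) r c (-1) 0) r c 0 1) r c 0 (-1)
      else m := rfl

def pvContrib (row col : Int) (g : List (List Int)) (i j r c : Int) : Int :=
    (if pvGrid g r c = 0 ∧ ((0 ≤ r + 1 ∧ r + 1 < row ∧ 0 ≤ c + 0 ∧ c + 0 < col ∧
        pvGrid g (r + 1) (c + 0) > 0) ∧ (r + 1 = i ∧ c + 0 = j)) then 1 else 0)
  + (if pvGrid g r c = 0 ∧ ((0 ≤ r + -1 ∧ r + -1 < row ∧ 0 ≤ c + 0 ∧ c + 0 < col ∧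
        pvGrid g (r + -1) (c + 0) > 0) ∧ (r + -1 = i ∧ c + 0 = j)) then 1 else 0)
  + (if pvGrid g r c = 0 ∧ ((0 ≤ r + 0 ∧ r + 0 < row ∧ 0 ≤ c + 1 ∧ c + 1 < col ∧
        pvGrid g (r + 0) (c + 1) > 0) ∧ (r + 0 = i ∧ c + 1 = j)) then 1 else 0)
  + (if pvGrid g r c = 0 ∧ ((0 ≤ r + 0 ∧ r + 0 < row ∧ 0 ≤ c + -1 ∧ c + -1 < col ∧
        pvGrid g (r + 0) (c + -1) > 0) ∧ (r + 0 = i ∧ c + -1 = j)) then 1 else 0)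

theorem step_pvScatter (row col : Int) (g : List (List Int)) (m : List (List Int))
    (h : ShapeM row col m) (r c i j : Int)
    (hi : 0 ≤ i) (hi2 : i < row) (hj : 0 ≤ j) (hj2 : j < col) :
    ShapeM row col (pvScatterStep row col g m r c) ∧
    pvGrid (pvScatterStep row col g m r c) i j = pvGrid m i j + pvContrib row col g i j r c := by
  rw [scatter_eq]
  by_cases hz : pvGrid g r c = 0
  · obtain ⟨s1, r1⟩ := read_pvCondInc row col g m h r c 1 0 i j hi hi2 hj hj2
    obtain ⟨s2, r2⟩ := read_pvCondInc row col g _ s1 r c (-1) 0 i j hi hi2 hj hj2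
    obtain ⟨s3, r3⟩ := read_pvCondInc row col g _ s2 r c 0 1 i j hi hi2 hj hj2
    obtain ⟨s4, r4⟩ := read_pvCondInc row col g _ s3 r c 0 (-1) i j hi hi2 hj hj2
    rw [if_pos hz]
    refine ⟨s4, ?_⟩
    rw [r4, r3, r2, r1, pvContrib]
    simp only [hz, true_and]
    omega
  · rw [if_neg hz]
    refine ⟨h, ?_⟩
    simp [pvContrib, hz]

theorem shape_m0 (row col : Int) :
    ShapeM row col ((PySem.List.pyRange 0 row 1).map (fun _ => List.replicate col.toNat (0 : Int))) := by
  constructor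
  · simp [PySem.List.length_pyRange_one]
  · intro l hl
    rcases List.mem_map.mp hl with ⟨x, _, hx⟩
    simp [← hx]

theorem read_m0 (row col : Int) (i j : Int)
    (hi : 0 ≤ i) (hi2 : i < row) (hj : 0 ≤ j) (hj2 : j < col) :
    pvGrid ((PySem.List.pyRange 0 row 1).map (fun _ => List.replicate col.toNat (0 : Int))) i j = 0 := by
  rw [pvGrid_nonneg _ _ _ hi hj]
  have hlen : i.toNat < (PySem.List.pyRange 0 row 1).length := by
    rw [PySem.List.length_pyRange_one]; omega
  rw [List.getElem?_map, List.getElem?_eq_getElem hlen]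
  have hj' : j.toNat < col.toNat := by omega
  simp [hj']

theorem contrib_eq (row col : Int) (g : List (List Int)) (i j : Int)
    (hi : 0 ≤ i) (hi2 : i < row) (hj : 0 ≤ j) (hj2 : j < col) (hpos : pvGrid g i j > 0)
    (r c : Int) :
    pvContrib row col g i j r c =
      (if c = j ∧ (r = i - 1 ∧ pvGrid g r c = 0) then (1 : Int) else 0)
    + (if c = j ∧ (r = i + 1 ∧ pvGrid g r c = 0) then 1 else 0)
    + (if c = j - 1 ∧ (r = i ∧ pvGrid g r c = 0) then 1 else 0)
    + (if c = j + 1 ∧ (r = i ∧ pvGrid g r c = 0) then 1 else 0) := by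
  have e1 : (if pvGrid g r c = 0 ∧ ((0 ≤ r + 1 ∧ r + 1 < row ∧ 0 ≤ c + 0 ∧ c + 0 < col ∧
        pvGrid g (r + 1) (c + 0) > 0) ∧ (r + 1 = i ∧ c + 0 = j)) then (1 : Int) else 0)
      = (if c = j ∧ (r = i - 1 ∧ pvGrid g r c = 0) then (1 : Int) else 0) := by
    by_cases hc : c = j
    · subst hc
      by_cases hr : r = i - 1
      · subst hr
        have hii : i - 1 + 1 = i := by ring
        rw [hii]
        simp only [add_zero]
        simp [hi, hi2, hj, hj2, hpos]
      · have h1 : ¬(r + 1 = i) := by omega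
        simp [h1, hr]
    · simp [hc]
  have e2 : (if pvGrid g r c = 0 ∧ ((0 ≤ r + -1 ∧ r + -1 < row ∧ 0 ≤ c + 0 ∧ c + 0 < col ∧
        pvGrid g (r + -1) (c + 0) > 0) ∧ (r + -1 = i ∧ c + 0 = j)) then (1 : Int) else 0)
      = (if c = j ∧ (r = i + 1 ∧ pvGrid g r c = 0) then (1 : Int) else 0) := by
    by_cases hc : c = j
    · subst hc
      by_cases hr : r = i + 1
      · subst hr
        have hii : i + 1 + -1 = i := by ring
        rw [hii]
        simp only [add_zero]
        simp [hi, hi2, hj, hj2, hpos]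
      · have h1 : ¬(r + -1 = i) := by omega
        simp [h1, hr]
    · simp [hc]
  have e3 : (if pvGrid g r c = 0 ∧ ((0 ≤ r + 0 ∧ r + 0 < row ∧ 0 ≤ c + 1 ∧ c + 1 < col ∧
        pvGrid g (r + 0) (c + 1) > 0) ∧ (r + 0 = i ∧ c + 1 = j)) then (1 : Int) else 0)
      = (if c = j - 1 ∧ (r = i ∧ pvGrid g r c = 0) then (1 : Int) else 0) := by
    by_cases hc : c = j - 1
    · subst hc
      by_cases hr : r = i
      · subst hr
        have hjj : j - 1 + 1 = j := by ring
        rw [hjj]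
        simp only [add_zero]
        simp [hi, hi2, hj, hj2, hpos]
      · simp [hr]
    · have h1 : ¬(c + 1 = j) := by omega
      simp [h1, hc]
  have e4 : (if pvGrid g r c = 0 ∧ ((0 ≤ r + 0 ∧ r + 0 < row ∧ 0 ≤ c + -1 ∧ c + -1 < col ∧
        pvGrid g (r + 0) (c + -1) > 0) ∧ (r + 0 = i ∧ c + -1 = j)) then (1 : Int) else 0)
      = (if c = j + 1 ∧ (r = i ∧ pvGrid g r c = 0) then (1 : Int) else 0) := by
    by_cases hc : c = j + 1
    · subst hc
      by_cases hr : r = i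
      · subst hr
        have hjj : j + 1 + -1 = j := by ring
        rw [hjj]
        simp only [add_zero]
        simp [hi, hi2, hj, hj2, hpos]
      · simp [hr]
    · have h1 : ¬(c + -1 = j) := by omega
      simp [h1, hc]
  rw [pvContrib, e1, e2, e3, e4]

theorem sum_contrib (row col : Int) (g : List (List Int)) (i j : Int)
    (hi : 0 ≤ i) (hi2 : i < row) (hj : 0 ≤ j) (hj2 : j < col) (hpos : pvGrid g i j > 0) :
    ((PySem.List.pyRange 0 row 1).map (fun r =>
      ((PySem.List.pyRange 0 col 1).map (fun c => pvContrib row col g i j r c)).sum)).sum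
    = (if (0 ≤ i - 1 ∧ i - 1 < row) ∧ pvGrid g (i - 1) j = 0 then (1 : Int) else 0)
    + (if (0 ≤ i + 1 ∧ i + 1 < row) ∧ pvGrid g (i + 1) j = 0 then 1 else 0)
    + (if (0 ≤ j - 1 ∧ j - 1 < col) ∧ pvGrid g i (j - 1) = 0 then 1 else 0)
    + (if (0 ≤ j + 1 ∧ j + 1 < col) ∧ pvGrid g i (j + 1) = 0 then 1 else 0) := by
  have hjmem : j ∈ PySem.List.pyRange 0 col 1 := PySem.List.mem_pyRange_one.mpr ⟨hj, hj2⟩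
  have himem : i ∈ PySem.List.pyRange 0 row 1 := PySem.List.mem_pyRange_one.mpr ⟨hi, hi2⟩
  have c1 : ∀ r : Int, ((PySem.List.pyRange 0 col 1).map (fun c =>
      if c = j ∧ (r = i - 1 ∧ pvGrid g r c = 0) then (1 : Int) else 0)).sum
      = if r = i - 1 ∧ pvGrid g r j = 0 then (1 : Int) else 0 := by
    intro r
    rw [sum_map_ite_eq _ (PySem.List.nodup_pyRange_one _ _) j
      (fun c => r = i - 1 ∧ pvGrid g r c = 0) 1]
    simp [hjmem]
  have c2 : ∀ r : Int, ((PySem.List.pyRange 0 col 1).map (fun c =>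
      if c = j ∧ (r = i + 1 ∧ pvGrid g r c = 0) then (1 : Int) else 0)).sum
      = if r = i + 1 ∧ pvGrid g r j = 0 then (1 : Int) else 0 := by
    intro r
    rw [sum_map_ite_eq _ (PySem.List.nodup_pyRange_one _ _) j
      (fun c => r = i + 1 ∧ pvGrid g r c = 0) 1]
    simp [hjmem]
  have c3 : ∀ r : Int, ((PySem.List.pyRange 0 col 1).map (fun c =>
      if c = j - 1 ∧ (r = i ∧ pvGrid g r c = 0) then (1 : Int) else 0)).sum
      = if r = i ∧ (j - 1 ∈ PySem.List.pyRange 0 col 1 ∧ pvGrid g r (j - 1) = 0)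
        then (1 : Int) else 0 := by
    intro r
    rw [sum_map_ite_eq _ (PySem.List.nodup_pyRange_one _ _) (j - 1)
      (fun c => r = i ∧ pvGrid g r c = 0) 1]
    exact if_congr (by tauto) rfl rfl
  have c4 : ∀ r : Int, ((PySem.List.pyRange 0 col 1).map (fun c =>
      if c = j + 1 ∧ (r = i ∧ pvGrid g r c = 0) then (1 : Int) else 0)).sum
      = if r = i ∧ (j + 1 ∈ PySem.List.pyRange 0 col 1 ∧ pvGrid g r (j + 1) = 0)
        then (1 : Int) else 0 := by
    intro r
    rw [sum_map_ite_eq _ (PySem.List.nodup_pyRange_one _ _) (j + 1)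
      (fun c => r = i ∧ pvGrid g r c = 0) 1]
    exact if_congr (by tauto) rfl rfl
  have hfun : (fun r => ((PySem.List.pyRange 0 col 1).map
        (fun c => pvContrib row col g i j r c)).sum)
      = (fun r =>
        (if r = i - 1 ∧ pvGrid g r j = 0 then (1 : Int) else 0)
      + (if r = i + 1 ∧ pvGrid g r j = 0 then (1 : Int) else 0)
      + (if r = i ∧ (j - 1 ∈ PySem.List.pyRange 0 col 1 ∧ pvGrid g r (j - 1) = 0)
          then (1 : Int) else 0)
      + (if r = i ∧ (j + 1 ∈ PySem.List.pyRange 0 col 1 ∧ pvGrid g r (j + 1) = 0)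
          then (1 : Int) else 0)) := by
    funext r
    rw [show (fun c => pvContrib row col g i j r c)
        = (fun c =>
          ((if c = j ∧ (r = i - 1 ∧ pvGrid g r c = 0) then (1 : Int) else 0)
        + (if c = j ∧ (r = i + 1 ∧ pvGrid g r c = 0) then (1 : Int) else 0)
        + (if c = j - 1 ∧ (r = i ∧ pvGrid g r c = 0) then (1 : Int) else 0))
        + (if c = j + 1 ∧ (r = i ∧ pvGrid g r c = 0) then (1 : Int) else 0)) from
      funext (fun c => contrib_eq row col g i j hi hi2 hj hj2 hpos r c)]
    rw [PySem.List.sum_map_add_int, PySem.List.sum_map_add_int, PySem.List.sum_map_add_int]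
    rw [c1 r, c2 r, c3 r, c4 r]
  rw [hfun]
  rw [PySem.List.sum_map_add_int, PySem.List.sum_map_add_int, PySem.List.sum_map_add_int]
  rw [sum_map_ite_eq _ (PySem.List.nodup_pyRange_one _ _) (i - 1)
    (fun r => pvGrid g r j = 0) 1]
  rw [sum_map_ite_eq _ (PySem.List.nodup_pyRange_one _ _) (i + 1)
    (fun r => pvGrid g r j = 0) 1]
  rw [sum_map_ite_eq _ (PySem.List.nodup_pyRange_one _ _) i
    (fun r => j - 1 ∈ PySem.List.pyRange 0 col 1 ∧ pvGrid g r (j - 1) = 0) 1]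
  rw [sum_map_ite_eq _ (PySem.List.nodup_pyRange_one _ _) i
    (fun r => j + 1 ∈ PySem.List.pyRange 0 col 1 ∧ pvGrid g r (j + 1) = 0) 1]
  have m1 : (i - 1 ∈ PySem.List.pyRange 0 row 1 ∧ pvGrid g (i - 1) j = 0)
      ↔ ((0 ≤ i - 1 ∧ i - 1 < row) ∧ pvGrid g (i - 1) j = 0) := by
    rw [PySem.List.mem_pyRange_one]
  have m2 : (i + 1 ∈ PySem.List.pyRange 0 row 1 ∧ pvGrid g (i + 1) j = 0)
      ↔ ((0 ≤ i + 1 ∧ i + 1 < row) ∧ pvGrid g (i + 1) j = 0) := by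
    rw [PySem.List.mem_pyRange_one]
  have m3 : (i ∈ PySem.List.pyRange 0 row 1 ∧
      (j - 1 ∈ PySem.List.pyRange 0 col 1 ∧ pvGrid g i (j - 1) = 0))
      ↔ ((0 ≤ j - 1 ∧ j - 1 < col) ∧ pvGrid g i (j - 1) = 0) := by
    rw [PySem.List.mem_pyRange_one, PySem.List.mem_pyRange_one]
    constructor
    · rintro ⟨_, hb, z⟩; exact ⟨hb, z⟩
    · rintro ⟨hb, z⟩; exact ⟨⟨hi, hi2⟩, hb, z⟩
  have m4 : (i ∈ PySem.List.pyRange 0 row 1 ∧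
      (j + 1 ∈ PySem.List.pyRange 0 col 1 ∧ pvGrid g i (j + 1) = 0))
      ↔ ((0 ≤ j + 1 ∧ j + 1 < col) ∧ pvGrid g i (j + 1) = 0) := by
    rw [PySem.List.mem_pyRange_one, PySem.List.mem_pyRange_one]
    constructor
    · rintro ⟨_, hb, z⟩; exact ⟨hb, z⟩
    · rintro ⟨hb, z⟩; exact ⟨⟨hi, hi2⟩, hb, z⟩
  rw [if_congr m1 rfl rfl, if_congr m2 rfl rfl, if_congr m3 rfl rfl, if_congr m4 rfl rfl]

theorem melt_read (row col : Int) (g : List (List Int)) (i j : Int)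
    (hi : 0 ≤ i) (hi2 : i < row) (hj : 0 ≤ j) (hj2 : j < col) (hpos : pvGrid g i j > 0) :
    pvGrid ((PySem.List.pyRange 0 row 1).foldl (fun melt r =>
      (PySem.List.pyRange 0 col 1).foldl (fun melt c =>
        pvScatterStep row col g melt r c) melt)
      ((PySem.List.pyRange 0 row 1).map (fun _ => List.replicate col.toNat (0 : Int)))) i j
    = (if (0 ≤ i - 1 ∧ i - 1 < row) ∧ pvGrid g (i - 1) j = 0 then (1 : Int) else 0)
    + (if (0 ≤ i + 1 ∧ i + 1 < row) ∧ pvGrid g (i + 1) j = 0 then 1 else 0)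
    + (if (0 ≤ j - 1 ∧ j - 1 < col) ∧ pvGrid g i (j - 1) = 0 then 1 else 0)
    + (if (0 ≤ j + 1 ∧ j + 1 < col) ∧ pvGrid g i (j + 1) = 0 then 1 else 0) := by
  have hF : ∀ (m : List (List Int)) (r : Int), ShapeM row col m →
      ShapeM row col ((PySem.List.pyRange 0 col 1).foldl
        (fun melt c => pvScatterStep row col g melt r c) m) ∧
      pvGrid ((PySem.List.pyRange 0 col 1).foldl
        (fun melt c => pvScatterStep row col g melt r c) m) i j
      = pvGrid m i j +
        ((PySem.List.pyRange 0 col 1).map (fun c => pvContrib row col g i j r c)).sum := by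
    intro m r hm
    exact foldl_read row col (fun melt c => pvScatterStep row col g melt r c)
      (fun c => pvContrib row col g i j r c) i j
      (fun m c hm => step_pvScatter row col g m hm r c i j hi hi2 hj hj2)
      (PySem.List.pyRange 0 col 1) m hm
  obtain ⟨_, hr⟩ := foldl_read row col
    (fun melt r => (PySem.List.pyRange 0 col 1).foldl
      (fun melt c => pvScatterStep row col g melt r c) melt)
    (fun r => ((PySem.List.pyRange 0 col 1).map (fun c => pvContrib row col g i j r c)).sum)
    i j (fun m r hm => hF m r hm)
    (PySem.List.pyRange 0 row 1)
    ((PySem.List.pyRange 0 row 1).map (fun _ => List.replicate col.toNat (0 : Int)))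
    (shape_m0 row col)
  rw [hr, read_m0 row col i j hi hi2 hj hj2,
    sum_contrib row col g i j hi hi2 hj hj2 hpos]
  ring

theorem zn_eq (row col : Int) (g : List (List Int)) (i j : Int)
    (hi : 0 ≤ i) (hi2 : i < row) (hj : 0 ≤ j) (hj2 : j < col) :
    pvDirections.foldl (fun meltNum d =>
      if 0 ≤ i + d.1 ∧ i + d.1 < row ∧ 0 ≤ j + d.2 ∧ j + d.2 < col ∧
          pvGrid g (i + d.1) (j + d.2) = 0
      then meltNum + 1 else meltNum) 0
    = (if (0 ≤ i - 1 ∧ i - 1 < row) ∧ pvGrid g (i - 1) j = 0 then (1 : Int) else 0)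
    + (if (0 ≤ i + 1 ∧ i + 1 < row) ∧ pvGrid g (i + 1) j = 0 then 1 else 0)
    + (if (0 ≤ j - 1 ∧ j - 1 < col) ∧ pvGrid g i (j - 1) = 0 then 1 else 0)
    + (if (0 ≤ j + 1 ∧ j + 1 < col) ∧ pvGrid g i (j + 1) = 0 then 1 else 0) := by
  have hneg : ∀ x : Int, x + -1 = x - 1 := fun x => by ring
  have hstep : ∀ (P : Prop) [Decidable P] (n : Int),
      (if P then n + 1 else n) = n + (if P then 1 else 0) := by
    intro P _ n; split_ifs <;> ring
  simp only [pvDirections, List.foldl_cons, List.foldl_nil, add_zero, hneg, hstep]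
  have q1 : ((0 ≤ i - 1 ∧ i - 1 < row) ∧ pvGrid g (i - 1) j = 0)
      ↔ (0 ≤ i - 1 ∧ i - 1 < row ∧ 0 ≤ j ∧ j < col ∧ pvGrid g (i - 1) j = 0) := by
    constructor
    · rintro ⟨⟨a, b⟩, z⟩; exact ⟨a, b, hj, hj2, z⟩
    · rintro ⟨a, b, _, _, z⟩; exact ⟨⟨a, b⟩, z⟩
  have q2 : ((0 ≤ i + 1 ∧ i + 1 < row) ∧ pvGrid g (i + 1) j = 0)
      ↔ (0 ≤ i + 1 ∧ i + 1 < row ∧ 0 ≤ j ∧ j < col ∧ pvGrid g (i + 1) j = 0) := by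
    constructor
    · rintro ⟨⟨a, b⟩, z⟩; exact ⟨a, b, hj, hj2, z⟩
    · rintro ⟨a, b, _, _, z⟩; exact ⟨⟨a, b⟩, z⟩
  have q3 : ((0 ≤ j - 1 ∧ j - 1 < col) ∧ pvGrid g i (j - 1) = 0)
      ↔ (0 ≤ i ∧ i < row ∧ 0 ≤ j - 1 ∧ j - 1 < col ∧ pvGrid g i (j - 1) = 0) := by
    constructor
    · rintro ⟨⟨a, b⟩, z⟩; exact ⟨hi, hi2, a, b, z⟩
    · rintro ⟨_, _, a, b, z⟩; exact ⟨⟨a, b⟩, z⟩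
  have q4 : ((0 ≤ j + 1 ∧ j + 1 < col) ∧ pvGrid g i (j + 1) = 0)
      ↔ (0 ≤ i ∧ i < row ∧ 0 ≤ j + 1 ∧ j + 1 < col ∧ pvGrid g i (j + 1) = 0) := by
    constructor
    · rintro ⟨⟨a, b⟩, z⟩; exact ⟨hi, hi2, a, b, z⟩
    · rintro ⟨_, _, a, b, z⟩; exact ⟨⟨a, b⟩, z⟩
  rw [if_congr q1 rfl rfl, if_congr q2 rfl rfl, if_congr q3 rfl rfl, if_congr q4 rfl rfl]
  ring

theorem main_eq (row col : Int) (g : List (List Int)) :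
    calculateMelting row col g = calculateMelting_alt row col g := by
  rw [calculateMelting, calculateMelting_alt]
  refine foldl_congr' _ _ _ ?_ []
  intro s r hrR
  refine foldl_congr' _ _ _ ?_ s
  intro s' c hcC
  rcases PySem.List.mem_pyRange_one.mp hrR with ⟨hr0, hr1⟩
  rcases PySem.List.mem_pyRange_one.mp hcC with ⟨hc0, hc1⟩
  by_cases hp : pvGrid g r c > 0
  · rw [if_pos hp, if_pos hp,
      melt_read row col g r c hr0 hr1 hc0 hc1 hp,
      zn_eq row col g r c hr0 hr1 hc0 hc1]
  · rw [if_neg hp, if_neg hp]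

-- ===== VERDICT (by name: the statement is the Claim_ definition above) =====
theorem calculateMelting_spec : Claim_equal_calculateMelting := by
  intro row col icebergs _ _
  unfold Spec_calculateMelting
  exact main_eq row col icebergs
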